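-- pv_equiv track=rewrite | github.com/smcn0012/Algorithms | Boyer-Moore/Boyermoore.py | matched_prefix_array
-- ===== SOURCE A (Python) =====
-- def z_algorithm(text) -> list:
--     z_values = [0 for _ in range(len(text))]
--     left = 0
--     right = 0
--     for index in range(1, len(text)):
--         if index > right: # index is past the rightmost z box
--             if text[index] == text[0]:
--                 left = index
--                 right = index
--                 search_index = 1
--                 while index + search_index != len(text): # find the length of the z box and record the new rightmost point
--                     if text[index + search_index] != text[search_index]:
--                         break
--                     right = index + search_index
--                     search_index += 1
--                 z_values[index] = right - index + 1
--         else: # index is within the rightmost z box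
--             known_value = z_values[index - left]
--             if known_value < right - index + 1: # the known sub-z-box ends before the current rightmost z-box
--                 z_values[index] = known_value
--             else: # the known sub-z-box ends at the same place or after as the current rightmost z-box
--                 if known_value == right - index + 1: # if it ends at the same place
--                     search_index = 1
--                     while right + search_index < len(text): # find the length of the z box and record the new rightmost point
--                         if text[right + search_index] != text[search_index + right - index]:
--                             break
--                         search_index += 1
--                     right = right + search_index - 1
--                     if search_index != 1: # there is a new right most z box
--                         left = index
--                 z_values[index] = right - index + 1
--     return z_values
--
-- def matched_prefix_array(pattern):
--     matched_prefix_array = [0 for _ in range(0, len(pattern) + 1)]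
--     z_values = z_algorithm(pattern[::-1])
--     z_values = z_values[::-1] # remove the last element that will be the length of the pattern
--     current_max = 0
--     for index, z_value in enumerate(z_values):
--         if z_value > current_max:
--             current_max = z_value
--         matched_prefix_array[len(pattern)-index] = current_max
--     matched_prefix_array[0] = len(pattern)
--     return matched_prefix_array
-- ===== SOURCE B (Python) =====
-- def matched_prefix_array(pattern):
--     # Direct O(n^2) computation: for each prefix end j, compare the pattern's
--     # suffix against the prefix ending at j character by character (no Z-algorithm),
--     # and keep a running maximum while filling the array back-to-front.
--     n = len(pattern)
--     best = 0
--     tail = []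
--     for j in range(n):
--         if j < n - 1:
--             L = 0
--             while L <= j and pattern[n - 1 - L] == pattern[j - L]:
--                 L += 1
--             best = max(best, L)
--         tail.append(best)
--     return [n] + tail[::-1]
-- ===== Notes on version B (the rewrite author's own statement) =====
-- stated objective: simpler
-- what changed: Replaces the Z-algorithm on the reversed pattern (z-boxes with left/right pointers, two reversals) by a direct per-position backward character comparison of the pattern's suffix against each prefix, feeding the same running maximum that fills the array back-to-front.
import Mathlib
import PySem

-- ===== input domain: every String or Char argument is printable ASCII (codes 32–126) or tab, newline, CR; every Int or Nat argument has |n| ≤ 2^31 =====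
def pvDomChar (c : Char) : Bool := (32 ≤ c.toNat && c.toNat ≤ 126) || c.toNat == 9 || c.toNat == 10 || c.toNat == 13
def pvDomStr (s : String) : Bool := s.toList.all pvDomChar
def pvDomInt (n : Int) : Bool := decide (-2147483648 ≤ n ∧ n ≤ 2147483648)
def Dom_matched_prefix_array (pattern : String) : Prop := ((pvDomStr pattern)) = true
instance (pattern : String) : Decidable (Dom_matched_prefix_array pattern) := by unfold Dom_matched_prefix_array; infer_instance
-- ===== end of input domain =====

-- B computes the same matched-prefix array by direct character comparisons (no Z-algorithm); objective: simpler.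

-- ===== PORT A =====
-- first inner while of z_algorithm ("index is past the rightmost z box"); returns the final `right`.
-- Python's loop guard `index + search_index != len(text)` is reached only with index+si ≤ n, so it equals `<` (used for termination).
def zWhile1 (t : List Char) (index si right : Nat) : Nat :=
  if _h : index + si < t.length then
    if t.getD (index + si) ' ' ≠ t.getD si ' ' then right
    else zWhile1 t index (si + 1) (index + si)
  else right
termination_by t.length - (index + si)

-- second inner while ("the known sub-z-box ends at the same place"); returns the final `search_index`.
def zWhile2 (t : List Char) (index right si : Nat) : Nat :=
  if _h : right + si < t.length then
    if t.getD (right + si) ' ' ≠ t.getD (si + right - index) ' ' then si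
    else zWhile2 t index right (si + 1)
  else si
termination_by t.length - (right + si)

-- one iteration of z_algorithm's main for-loop; state = (z_values, left, right)
def zStep (t : List Char) (st : List Int × Nat × Nat) (index : Nat) : List Int × Nat × Nat :=
  let (z, left, right) := st
  if index > right then
    if t.getD index ' ' = t.getD 0 ' ' then
      let right' := zWhile1 t index 1 index
      (z.set index ((right' : Int) - (index : Int) + 1), index, right')
    else (z, left, right)
  else
    let known : Int := z.getD (index - left) 0
    if known < (right : Int) - (index : Int) + 1 then
      (z.set index known, left, right)
    else
      if known = (right : Int) - (index : Int) + 1 then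
        let si := zWhile2 t index right 1
        let right' := right + si - 1
        let left' := if si ≠ 1 then index else left
        (z.set index ((right' : Int) - (index : Int) + 1), left', right')
      else (z.set index ((right : Int) - (index : Int) + 1), left, right)

def z_algorithm (t : List Char) : List Int :=
  let n := t.length
  let init : List Int × Nat × Nat := (List.replicate n 0, 0, 0)
  ((List.range' 1 (n - 1)).foldl (zStep t) init).1

-- running-max assembly loop of matched_prefix_array (enumerate rendered as an explicit
-- counter in the state); state = (mp, current_max, index)
def mpStep (n : Nat) (st : List Int × Int × Nat) (z : Int) : List Int × Int × Nat :=
  let (mp, cmax, index) := st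
  let cmax' := if z > cmax then z else cmax
  (mp.set (n - index) cmax', cmax', index + 1)

def matched_prefix_array (pattern : String) : List Int :=
  let p := pattern.toList
  let n := p.length
  let mp0 : List Int := List.replicate (n + 1) 0
  let zv := (z_algorithm p.reverse).reverse
  let res := zv.foldl (mpStep n) (mp0, 0, 0)
  res.1.set 0 (n : Int)

-- ===== PORT B =====
-- B's inner while: length of the common suffix of `p` and `p[:j+1]`, by direct comparison.
def lcsWhile (p : List Char) (j L : Nat) : Nat :=
  if _h : L ≤ j ∧ p.getD (p.length - 1 - L) ' ' = p.getD (j - L) ' ' then lcsWhile p j (L + 1)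
  else L
termination_by j + 1 - L

-- B's for-loop body; state = (best, tail)
def bStep (p : List Char) (st : Int × List Int) (j : Nat) : Int × List Int :=
  let (best, tail) := st
  let best' := if j < p.length - 1 then max best ((lcsWhile p j 0 : Int)) else best
  (best', tail ++ [best'])

def matched_prefix_array_alt (pattern : String) : List Int :=
  let p := pattern.toList
  let n := p.length
  let res := (List.range n).foldl (bStep p) (0, [])
  (n : Int) :: res.2.reverse

-- ===== PRECONDITION & SPEC =====
def Spec_matched_prefix_array (pattern : String) (out : List Int) : Prop := out = matched_prefix_array_alt pattern
instance (pattern : String) (out : List Int) : Decidable (Spec_matched_prefix_array pattern out) := by unfold Spec_matched_prefix_array; infer_instance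

-- ===== CLAIM (what is proved, stated in full; the proofs are below) =====
def Claim_equal_matched_prefix_array : Prop := ∀ (pattern : String), Dom_matched_prefix_array pattern → Spec_matched_prefix_array pattern (matched_prefix_array pattern)

-- ===== LEMMAS AND PROOFS =====

-- generic list indexing facts
theorem getD_drop' (l : List Char) (i k : Nat) (d : Char) :
    (l.drop i).getD k d = l.getD (i + k) d := by
  simp [List.getD, List.getElem?_drop]

-- longest common prefix of two character lists (proof-side spec tool)
def lcp : List Char → List Char → Nat
  | a :: s, b :: t => if a = b then lcp s t + 1 else 0
  | _, _ => 0

theorem lcp_le_right (a b : List Char) : lcp a b ≤ b.length := by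
  induction a generalizing b with
  | nil => simp [lcp]
  | cons x s ih =>
    cases b with
    | nil => simp [lcp]
    | cons y t =>
      simp only [lcp, List.length_cons]
      split_ifs
      · have := ih t; omega
      · omega

theorem lcp_getD (a b : List Char) (k : Nat) (h : k < lcp a b) (d : Char) :
    a.getD k d = b.getD k d := by
  induction a generalizing b k with
  | nil => simp [lcp] at h
  | cons x s ih =>
    cases b with
    | nil => simp [lcp] at h
    | cons y t =>
      simp only [lcp] at h
      split_ifs at h with hxy
      · cases k with
        | zero => simpa using hxy
        | succ k => simpa using ih t k (by omega) 
      · omega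

theorem lcp_ne (a b : List Char) (h1 : lcp a b < a.length) (h2 : lcp a b < b.length) (d : Char) :
    a.getD (lcp a b) d ≠ b.getD (lcp a b) d := by
  induction a generalizing b with
  | nil => simp at h1
  | cons x s ih =>
    cases b with
    | nil => simp at h2
    | cons y t =>
      simp only [lcp, List.length_cons] at *
      split_ifs at * with hxy
      · simpa using ih t (by omega) (by omega)
      · simpa using hxy

theorem lcp_ge (a b : List Char) (m : Nat) (h1 : m ≤ a.length) (h2 : m ≤ b.length)
    (h : ∀ k, k < m → a.getD k ' ' = b.getD k ' ') : m ≤ lcp a b := by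
  induction a generalizing b m with
  | nil => simp at h1; omega
  | cons x s ih =>
    cases b with
    | nil => simp at h2; omega
    | cons y t =>
      cases m with
      | zero => omega
      | succ m =>
        have hxy : x = y := by simpa using h 0 (by omega)
        simp only [lcp, hxy, if_true]
        have := ih t m (by simpa using h1) (by simpa using h2)
          (fun k hk => by simpa using h (k + 1) (by omega))
        omega

-- the Z-value at position i (what z_algorithm stores for i ≥ 1)
theorem zv_le (t : List Char) (i : Nat) : lcp t (t.drop i) ≤ t.length - i := by
  have := lcp_le_right t (t.drop i); simpa using this

theorem zchar_eq (t : List Char) (i k : Nat) (h : k < lcp t (t.drop i)) :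
    t.getD k ' ' = t.getD (i + k) ' ' := by
  have := lcp_getD t (t.drop i) k h ' '
  rwa [getD_drop'] at this

theorem zchar_ne (t : List Char) (i : Nat) (h : i + lcp t (t.drop i) < t.length) :
    t.getD (lcp t (t.drop i)) ' ' ≠ t.getD (i + lcp t (t.drop i)) ' ' := by
  have hd : lcp t (t.drop i) < (t.drop i).length := by
    simp only [List.length_drop]; omega
  have := lcp_ne t (t.drop i) (by omega) hd ' '
  rwa [getD_drop'] at this

theorem getD_reverse {α : Type} (l : List α) (k : Nat) (hk : k < l.length) (d : α) :
    l.reverse.getD k d = l.getD (l.length - 1 - k) d := by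
  rw [List.getD_eq_getElem _ _ (by simpa using hk), List.getD_eq_getElem _ _ (by omega),
    List.getElem_reverse]

-- characterisation of A's first inner while
theorem zWhile1_spec (t : List Char) (i si : Nat) (h1 : 1 ≤ si)
    (h2 : si ≤ lcp t (t.drop i)) :
    zWhile1 t i si (i + si - 1) = i + lcp t (t.drop i) - 1 := by
  have main : ∀ d si, 1 ≤ si → si ≤ lcp t (t.drop i) → lcp t (t.drop i) - si = d →
      zWhile1 t i si (i + si - 1) = i + lcp t (t.drop i) - 1 := by
    intro d
    induction d with
    | zero =>
      intro si hs1 hs2 hd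
      have hsm : si = lcp t (t.drop i) := by omega
      by_cases hlt : i + si < t.length
      · have hne := zchar_ne t i (by omega)
        rw [zWhile1, dif_pos hlt, if_pos (by rw [hsm]; exact fun h => hne h.symm)]
        omega
      · rw [zWhile1, dif_neg hlt]
        omega
    | succ d ih =>
      intro si hs1 hs2 hd
      have hle := zv_le t i
      have hin : i < t.length := by omega
      have hlt : i + si < t.length := by omega
      have heq := zchar_eq t i si (by omega)
      rw [zWhile1, dif_pos hlt, if_neg (by rw [← heq]; simp)]
      have := ih (si + 1) (by omega) (by omega) (by omega)
      have harr : i + (si + 1) - 1 = i + si := by omega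
      rwa [harr] at this
  exact main (lcp t (t.drop i) - si) si h1 h2 rfl

-- characterisation of A's second inner while
theorem zWhile2_spec (t : List Char) (i r si : Nat) (_hi : 1 ≤ i) (hir : i ≤ r)
    (h1 : 1 ≤ si) (h2 : (r - i) + si ≤ lcp t (t.drop i)) :
    zWhile2 t i r si = lcp t (t.drop i) - (r - i) := by
  have main : ∀ d si, 1 ≤ si → (r - i) + si ≤ lcp t (t.drop i) →
      lcp t (t.drop i) - ((r - i) + si) = d → zWhile2 t i r si = lcp t (t.drop i) - (r - i) := by
    intro d
    induction d with
    | zero =>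
      intro si hs1 hs2 hd
      by_cases hlt : r + si < t.length
      · have him : i + lcp t (t.drop i) < t.length := by omega
        have hne := zchar_ne t i him
        have ha : si + r - i = lcp t (t.drop i) := by omega
        have hb : r + si = i + lcp t (t.drop i) := by omega
        rw [zWhile2, dif_pos hlt, if_pos (by rw [ha, hb]; exact fun h => hne h.symm)]
        omega
      · rw [zWhile2, dif_neg hlt]; omega
    | succ d ih =>
      intro si hs1 hs2 hd
      have hle := zv_le t i
      have hin : i < t.length := by omega
      have hlt : r + si < t.length := by omega
      have heq := zchar_eq t i ((r - i) + si) (by omega)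
      have ha : si + r - i = (r - i) + si := by omega
      have hb : i + ((r - i) + si) = r + si := by omega
      rw [zWhile2, dif_pos hlt, if_neg (by rw [ha, ← hb]; exact fun h => h heq.symm)]
      exact ih (si + 1) (by omega) (by omega) (by omega)
  exact main (lcp t (t.drop i) - ((r - i) + si)) si h1 h2 rfl

-- characterisation of B's inner while
theorem lcsWhile_spec (p : List Char) (j L : Nat) (hj : j < p.length)
    (hL : L ≤ lcp p.reverse (p.reverse.drop (p.length - 1 - j))) :
    lcsWhile p j L = lcp p.reverse (p.reverse.drop (p.length - 1 - j)) := by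
  have hsle : lcp p.reverse (p.reverse.drop (p.length - 1 - j)) ≤ j + 1 := by
    have := lcp_le_right p.reverse (p.reverse.drop (p.length - 1 - j))
    simp only [List.length_drop, List.length_reverse] at this
    omega
  have hn1 : 1 ≤ p.length := by omega
  have main : ∀ d L, L ≤ lcp p.reverse (p.reverse.drop (p.length - 1 - j)) →
      lcp p.reverse (p.reverse.drop (p.length - 1 - j)) - L = d →
      lcsWhile p j L = lcp p.reverse (p.reverse.drop (p.length - 1 - j)) := by
    intro d
    induction d with
    | zero =>
      intro L hL1 hd
      have hLs : L = lcp p.reverse (p.reverse.drop (p.length - 1 - j)) := by omega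
      rw [lcsWhile, dif_neg]
      · omega
      · rintro ⟨hLj, hchars⟩
        have hne := lcp_ne p.reverse (p.reverse.drop (p.length - 1 - j))
          (by simp only [List.length_reverse]; omega)
          (by simp only [List.length_drop, List.length_reverse]; omega) ' '
        rw [getD_drop'] at hne
        have c1 : p.reverse.getD L ' ' = p.getD (p.length - 1 - L) ' ' :=
          getD_reverse p L (by omega) ' '
        have c2 : p.reverse.getD (p.length - 1 - j + L) ' ' = p.getD (j - L) ' ' := by
          rw [getD_reverse p _ (by omega) ' ']
          congr 1
          omega
        rw [← hLs, c1, c2] at hne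
        exact hne hchars
    | succ d ih =>
      intro L hL1 hd
      have hLlt : L < lcp p.reverse (p.reverse.drop (p.length - 1 - j)) := by omega
      have hLj : L ≤ j := by omega
      have heq := lcp_getD p.reverse (p.reverse.drop (p.length - 1 - j)) L hLlt ' '
      rw [getD_drop'] at heq
      have c1 : p.reverse.getD L ' ' = p.getD (p.length - 1 - L) ' ' :=
        getD_reverse p L (by omega) ' '
      have c2 : p.reverse.getD (p.length - 1 - j + L) ' ' = p.getD (j - L) ' ' := by
        rw [getD_reverse p _ (by omega) ' ']
        congr 1
        omega
      rw [c1, c2] at heq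
      rw [lcsWhile, dif_pos ⟨hLj, heq⟩]
      exact ih (L + 1) (by omega) (by omega)
  exact main (lcp p.reverse (p.reverse.drop (p.length - 1 - j)) - L) L hL rfl

def ZA (t : List Char) (j : Nat) : Int := if j = 0 then 0 else (lcp t (t.drop j) : Int)

def ZInv (t : List Char) (i : Nat) (st : List Int × Nat × Nat) : Prop :=
  st.1.length = t.length ∧
  (∀ j, j < t.length → st.1.getD j 0 = if j < i then ZA t j else 0) ∧
  ((st.2.1 = 0 ∧ st.2.2 = 0) ∨
   (1 ≤ st.2.1 ∧ st.2.1 < i ∧ st.2.1 ≤ st.2.2 ∧ st.2.2 < t.length ∧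
    lcp t (t.drop st.2.1) = st.2.2 - st.2.1 + 1))

theorem getD_set (z : List Int) (i j : Nat) (v : Int) :
    (z.set i v).getD j 0 = if j = i ∧ i < z.length then v else z.getD j 0 := by
  simp [List.getD, List.getElem?_set]
  split_ifs <;> simp_all

theorem zStep_inv (t : List Char) (i : Nat) (st : List Int × Nat × Nat)
    (hinv : ZInv t i st) (h1 : 1 ≤ i) (h2 : i < t.length) :
    ZInv t (i + 1) (zStep t st i) := by
  obtain ⟨z, l, r⟩ := st
  obtain ⟨hlen, hz, hbox⟩ := hinv
  simp only at hlen hz hbox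
  have hmle := zv_le t i
  by_cases hir : i > r
  · by_cases hc : t.getD i ' ' = t.getD 0 ' '
    · -- new z box starting at i
      have hm1 : 1 ≤ lcp t (t.drop i) := by
        apply lcp_ge t (t.drop i) 1 (by omega) (by simp only [List.length_drop]; omega)
        intro k hk
        have hk0 : k = 0 := by omega
        subst hk0
        rw [getD_drop']
        simpa using hc.symm
      have hw := zWhile1_spec t i 1 (le_refl 1) hm1
      have e1 : i + 1 - 1 = i := by omega
      rw [e1] at hw
      refine ⟨?_, ?_, ?_⟩
      · simp only [zStep, if_pos hir, if_pos hc]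
        simpa using hlen
      · intro j hj
        simp only [zStep, if_pos hir, if_pos hc, getD_set]
        by_cases hji : j = i
        · subst hji
          rw [if_pos ⟨rfl, by omega⟩, hw, if_pos (show j < j + 1 by omega), ZA,
            if_neg (show ¬(j = 0) by omega)]
          omega
        · rw [if_neg (by simp [hji])]
          rw [hz j hj]
          have hiff : (j < i) ↔ (j < i + 1) := by omega
          simp only [hiff]
      · simp only [zStep, if_pos hir, if_pos hc, hw]
        right
        refine ⟨by omega, by omega, by omega, by omega, by omega⟩
    · -- no match at i: z[i] stays 0, box unchanged
      have hm0 : lcp t (t.drop i) = 0 := by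
        by_contra h
        have := zchar_eq t i 0 (by omega)
        simp only [Nat.add_zero] at this
        exact hc this.symm
      refine ⟨?_, ?_, ?_⟩
      · simp only [zStep, if_pos hir, if_neg hc]
        exact hlen
      · intro j hj
        simp only [zStep, if_pos hir, if_neg hc]
        rw [hz j hj]
        by_cases hji : j = i
        · subst hji
          rw [if_neg (by omega), if_pos (by omega), ZA, if_neg (by omega), hm0]
          simp
        · have hiff : (j < i) ↔ (j < i + 1) := by omega
          simp only [hiff]
      · simp only [zStep, if_pos hir, if_neg hc]
        rcases hbox with h | h
        · exact Or.inl h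
        · exact Or.inr ⟨h.1, by omega, h.2.2.1, h.2.2.2.1, h.2.2.2.2⟩
  · -- i is inside the rightmost z box
    have hir' : i ≤ r := by omega
    obtain ⟨hl1, hli, hlr, hrn, hbl⟩ :
        1 ≤ l ∧ l < i ∧ l ≤ r ∧ r < t.length ∧ lcp t (t.drop l) = r - l + 1 := by
      rcases hbox with h | h
      · omega
      · exact h
    have hknown : z.getD (i - l) 0 = (lcp t (t.drop (i - l)) : Int) := by
      rw [hz (i - l) (by omega), if_pos (by omega), ZA, if_neg (by omega)]
    have hchain : ∀ k, k ≤ r - i → t.getD (i + k) ' ' = t.getD ((i - l) + k) ' ' := by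
      intro k hk
      have h1' := zchar_eq t l ((i - l) + k) (by rw [hbl]; omega)
      have e : l + ((i - l) + k) = i + k := by omega
      rw [e] at h1'
      exact h1'.symm
    have hkm_le := zv_le t (i - l)
    by_cases hcase1 : z.getD (i - l) 0 < (r : Int) - (i : Int) + 1
    · -- known value ends strictly before the box end: copy it
      have hkmlt : lcp t (t.drop (i - l)) < r - i + 1 := by
        rw [hknown] at hcase1
        omega
      have hge : lcp t (t.drop (i - l)) ≤ lcp t (t.drop i) := by
        apply lcp_ge t (t.drop i) _ (by omega) (by simp only [List.length_drop]; omega)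
        intro k hk
        rw [getD_drop']
        rw [hchain k (by omega)]
        exact zchar_eq t (i - l) k hk
      have hle2 : lcp t (t.drop i) ≤ lcp t (t.drop (i - l)) := by
        by_contra h
        rw [not_le] at h
        have e1 := zchar_eq t i (lcp t (t.drop (i - l))) (by omega)
        have e2 := hchain (lcp t (t.drop (i - l))) (by omega)
        have hx : (i - l) + lcp t (t.drop (i - l)) < t.length := by
          have h5 : (i - l) + lcp t (t.drop (i - l)) ≤ r - l := by omega
          omega
        have e3 := zchar_ne t (i - l) hx
        exact e3 (e1.trans e2)
      have hm : lcp t (t.drop i) = lcp t (t.drop (i - l)) := le_antisymm hle2 hge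
      refine ⟨?_, ?_, ?_⟩
      · simp only [zStep, if_neg hir, if_pos hcase1]
        simpa using hlen
      · intro j hj
        simp only [zStep, if_neg hir, if_pos hcase1, getD_set]
        by_cases hji : j = i
        · subst hji
          rw [if_pos ⟨rfl, by omega⟩, hknown, if_pos (show j < j + 1 by omega), ZA,
            if_neg (show ¬(j = 0) by omega), hm]
        · rw [if_neg (by simp [hji]), hz j hj]
          have hiff : (j < i) ↔ (j < i + 1) := by omega
          simp only [hiff]
      · simp only [zStep, if_neg hir, if_pos hcase1]
        right
        exact ⟨hl1, by omega, hlr, hrn, hbl⟩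
    · have hge : r - i + 1 ≤ lcp t (t.drop i) := by
        apply lcp_ge t (t.drop i) _ (by omega) (by simp only [List.length_drop]; omega)
        intro k hk
        rw [getD_drop']
        rw [hchain k (by omega)]
        have hkkm : k < lcp t (t.drop (i - l)) := by
          rw [hknown] at hcase1
          omega
        exact zchar_eq t (i - l) k hkkm
      by_cases hcase2 : z.getD (i - l) 0 = (r : Int) - (i : Int) + 1
      · -- known value ends exactly at the box end: try to extend
        have hw := zWhile2_spec t i r 1 h1 hir' (le_refl 1) (by omega)
        have hsi1 : 1 ≤ zWhile2 t i r 1 := by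
          rw [hw]
          omega
        have hrt : r + zWhile2 t i r 1 - 1 = i + lcp t (t.drop i) - 1 := by
          rw [hw]
          omega
        refine ⟨?_, ?_, ?_⟩
        · simp only [zStep, if_neg hir, if_neg hcase1, if_pos hcase2]
          simpa using hlen
        · intro j hj
          simp only [zStep, if_neg hir, if_neg hcase1, if_pos hcase2, getD_set]
          by_cases hji : j = i
          · subst hji
            rw [if_pos ⟨rfl, by omega⟩, hrt, if_pos (show j < j + 1 by omega), ZA,
              if_neg (show ¬(j = 0) by omega)]
            omega
          · rw [if_neg (by simp [hji]), hz j hj]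
            have hiff : (j < i) ↔ (j < i + 1) := by omega
            simp only [hiff]
        · simp only [zStep, if_neg hir, if_neg hcase1, if_pos hcase2, hrt]
          by_cases hsi : zWhile2 t i r 1 ≠ 1
          · rw [if_pos hsi]
            right
            have h6 : 2 ≤ zWhile2 t i r 1 := by omega
            rw [hw] at h6
            refine ⟨by omega, by omega, by omega, by omega, by omega⟩
          · rw [if_neg hsi]
            rw [not_not] at hsi
            right
            have hreq : r + zWhile2 t i r 1 - 1 = r := by omega
            rw [← hrt, hreq]
            exact ⟨hl1, by omega, hlr, hrn, hbl⟩
      · -- known value passes the box end: z[i] is exactly the distance to the box end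
        have hkmgt : r - i + 1 < lcp t (t.drop (i - l)) := by
          rw [hknown] at hcase1 hcase2
          omega
        have hle2 : lcp t (t.drop i) ≤ r - i + 1 := by
          by_contra h
          rw [not_le] at h
          by_cases hr1 : r + 1 < t.length
          · have e1 := zchar_eq t i (r - i + 1) (by omega)
            have ei1 : i + (r - i + 1) = r + 1 := by omega
            rw [ei1] at e1
            have e2 := zchar_eq t (i - l) (r - i + 1) hkmgt
            have ei2 : (i - l) + (r - i + 1) = r - l + 1 := by omega
            rw [ei2] at e2
            have e3 := zchar_ne t l (by rw [hbl]; omega)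
            rw [hbl] at e3
            have ei3 : l + (r - l + 1) = r + 1 := by omega
            rw [ei3] at e3
            exact e3 ((e2.symm.trans e1).symm ▸ (e2.symm.trans e1))
          · omega
        have hm : lcp t (t.drop i) = r - i + 1 := by omega
        refine ⟨?_, ?_, ?_⟩
        · simp only [zStep, if_neg hir, if_neg hcase1, if_neg hcase2]
          simpa using hlen
        · intro j hj
          simp only [zStep, if_neg hir, if_neg hcase1, if_neg hcase2, getD_set]
          by_cases hji : j = i
          · subst hji
            rw [if_pos ⟨rfl, by omega⟩, if_pos (show j < j + 1 by omega), ZA,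
              if_neg (show ¬(j = 0) by omega), hm]
            omega
          · rw [if_neg (by simp [hji]), hz j hj]
            have hiff : (j < i) ↔ (j < i + 1) := by omega
            simp only [hiff]
        · simp only [zStep, if_neg hir, if_neg hcase1, if_neg hcase2]
          right
          exact ⟨hl1, by omega, hlr, hrn, hbl⟩

theorem zfold_inv (t : List Char) (k i : Nat) (st : List Int × Nat × Nat)
    (h1 : 1 ≤ i) (hk : i + k ≤ t.length) (hinv : ZInv t i st) :
    ZInv t (i + k) ((List.range' i k).foldl (zStep t) st) := by
  induction k generalizing i st with
  | zero => simpa using hinv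
  | succ k ih =>
    rw [List.range'_succ, List.foldl_cons]
    have h3 : i + (k + 1) = (i + 1) + k := by omega
    rw [h3]
    exact ih (i + 1) (zStep t st i) (by omega) (by omega)
      (zStep_inv t i st hinv h1 (by omega))

theorem zalg_inv (t : List Char) (h : 1 ≤ t.length) :
    ZInv t t.length
      ((List.range' 1 (t.length - 1)).foldl (zStep t) (List.replicate t.length 0, 0, 0)) := by
  have h0 : ZInv t 1 (List.replicate t.length 0, 0, 0) := by
    refine ⟨by simp, ?_, Or.inl ⟨rfl, rfl⟩⟩
    intro j hj
    have hrep : (List.replicate t.length (0 : Int)).getD j 0 = 0 := by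
      simp [List.getD, List.getElem?_replicate]
      split_ifs <;> rfl
    rw [hrep]
    by_cases hj1 : j < 1
    · have hj0 : j = 0 := by omega
      subst hj0
      rw [if_pos hj1]
      simp [ZA]
    · rw [if_neg hj1]
  have := zfold_inv t (t.length - 1) 1 (List.replicate t.length 0, 0, 0) (le_refl 1)
    (by omega) h0
  have e : 1 + (t.length - 1) = t.length := by omega
  rwa [e] at this

theorem zalg_length (t : List Char) : (z_algorithm t).length = t.length := by
  by_cases h : 1 ≤ t.length
  · exact (zalg_inv t h).1
  · have ht : t = [] := by
      cases t
      · rfl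
      · simp at h
    subst ht
    rfl

theorem zalg_getD (t : List Char) (j : Nat) (hj : j < t.length) :
    (z_algorithm t).getD j 0 = ZA t j := by
  have h : 1 ≤ t.length := by omega
  have := (zalg_inv t h).2.1 j hj
  rw [z_algorithm, this, if_pos hj]

-- the per-position candidate value both programs feed into the running max
def vval (p : List Char) (j : Nat) : Int :=
  if j < p.length - 1 then (lcp p.reverse (p.reverse.drop (p.length - 1 - j)) : Int) else 0

-- the running maximum after j iterations
def cmF (p : List Char) : Nat → Int
  | 0 => 0
  | j + 1 => if vval p j > cmF p j then vval p j else cmF p j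

theorem vval_nonneg (p : List Char) (j : Nat) : 0 ≤ vval p j := by
  rw [vval]
  split_ifs
  · exact Int.natCast_nonneg _
  · exact le_refl 0

theorem cmF_nonneg (p : List Char) (j : Nat) : 0 ≤ cmF p j := by
  induction j with
  | zero => simp [cmF]
  | succ j ih =>
    rw [cmF]
    have := vval_nonneg p j
    split_ifs <;> omega

theorem cmF_succ (p : List Char) (j : Nat) : cmF p (j + 1) = max (cmF p j) (vval p j) := by
  rw [cmF, max_def]
  split_ifs <;> omega

theorem zv_getD_eq_vval (p : List Char) (j : Nat) (hj : j < p.length) :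
    ((z_algorithm p.reverse).reverse).getD j 0 = vval p j := by
  have hlen : (z_algorithm p.reverse).length = p.length := by
    rw [zalg_length, List.length_reverse]
  rw [getD_reverse _ _ (by rw [hlen]; exact hj), hlen,
    zalg_getD _ _ (by simp only [List.length_reverse]; omega), ZA, vval]
  by_cases hc : j < p.length - 1
  · rw [if_neg (show ¬(p.length - 1 - j = 0) by omega), if_pos hc]
  · rw [if_pos (show p.length - 1 - j = 0 by omega), if_neg hc]

theorem bfold_spec (p : List Char) (k j : Nat) (tail : List Int) (hjk : j + k ≤ p.length) :
    (List.range' j k).foldl (bStep p) (cmF p j, tail) =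
      (cmF p (j + k), tail ++ (List.range' j k).map (fun a => cmF p (a + 1))) := by
  induction k generalizing j tail with
  | zero => simp
  | succ k ih =>
    rw [List.range'_succ, List.foldl_cons, List.map_cons]
    have hstep : bStep p (cmF p j, tail) j = (cmF p (j + 1), tail ++ [cmF p (j + 1)]) := by
      have hb : (if j < p.length - 1 then max (cmF p j) ((lcsWhile p j 0 : Int))
          else cmF p j) = cmF p (j + 1) := by
        by_cases hc : j < p.length - 1
        · rw [if_pos hc, lcsWhile_spec p j 0 (by omega) (by omega), cmF_succ, vval,
            if_pos hc]
        · rw [if_neg hc, cmF_succ, vval, if_neg hc]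
          have := cmF_nonneg p j
          omega
      simp only [bStep, hb]
    rw [hstep]
    have h4 : j + (k + 1) = (j + 1) + k := by omega
    rw [h4]
    have := ih (j + 1) (tail ++ [cmF p (j + 1)]) (by omega)
    rw [this]
    simp

theorem getD_map_range' (f : Nat → Int) (n idx : Nat) (h : idx < n) :
    ((List.range' 0 n).map f).getD idx 0 = f idx := by
  rw [List.getD_eq_getElem _ _ (by simpa using h)]
  simp

theorem zv_eq (p : List Char) :
    (z_algorithm p.reverse).reverse = (List.range' 0 p.length).map (vval p) := by
  apply List.ext_getElem
  · simp [zalg_length]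
  · intro i h1' h2'
    have hi : i < p.length := by simpa using h2'
    rw [← List.getD_eq_getElem _ 0 h1', ← List.getD_eq_getElem _ 0 h2',
      zv_getD_eq_vval p i hi, getD_map_range' _ _ _ hi]

theorem mpfold_spec (p : List Char) (k j : Nat) (mp : List Int)
    (hjk : j + k ≤ p.length) (hmp : mp.length = p.length + 1) :
    (((List.range' j k).map (vval p)).foldl (mpStep p.length) (mp, cmF p j, j)).2.1 = cmF p (j + k) ∧
    (((List.range' j k).map (vval p)).foldl (mpStep p.length) (mp, cmF p j, j)).2.2 = j + k ∧
    (((List.range' j k).map (vval p)).foldl (mpStep p.length) (mp, cmF p j, j)).1.length = mp.length ∧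
    (∀ idx, (((List.range' j k).map (vval p)).foldl (mpStep p.length) (mp, cmF p j, j)).1.getD idx 0 =
      if p.length - (j + k) < idx ∧ idx ≤ p.length - j then cmF p (p.length - idx + 1)
      else mp.getD idx 0) := by
  induction k generalizing j mp with
  | zero =>
    refine ⟨by simp, by simp, by simp, ?_⟩
    intro idx
    simp only [List.range'_zero, List.map_nil, List.foldl_nil]
    rw [if_neg (by omega)]
  | succ k ih =>
    rw [List.range'_succ, List.map_cons, List.foldl_cons]
    have hstep : mpStep p.length (mp, cmF p j, j) (vval p j) =
        (mp.set (p.length - j) (cmF p (j + 1)), cmF p (j + 1), j + 1) := by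
      have hb : (if vval p j > cmF p j then vval p j else cmF p j) = cmF p (j + 1) := by
        rw [cmF_succ, max_def]
        split_ifs <;> omega
      simp only [mpStep, hb]
    rw [hstep]
    have h4 : j + (k + 1) = (j + 1) + k := by omega
    rw [h4]
    obtain ⟨c1, c2, c3, c4⟩ := ih (j + 1) (mp.set (p.length - j) (cmF p (j + 1)))
      (by omega) (by simpa using hmp)
    refine ⟨c1, c2, by simpa using c3, ?_⟩
    intro idx
    rw [c4 idx, getD_set]
    by_cases hA : p.length - ((j + 1) + k) < idx ∧ idx ≤ p.length - (j + 1)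
    · rw [if_pos hA, if_pos (by omega)]
    · rw [if_neg hA]
      by_cases hB : idx = p.length - j
      · rw [if_pos ⟨hB, by omega⟩, if_pos (by omega)]
        have e : p.length - idx = j := by omega
        rw [e]
      · rw [if_neg (by simp [hB]), if_neg (by omega)]

theorem a_closed (pattern : String) :
    matched_prefix_array pattern =
      ((pattern.toList.length : Int)) ::
        ((List.range' 0 pattern.toList.length).map (fun a => cmF pattern.toList (a + 1))).reverse := by
  obtain ⟨c1, c2, c3, c4⟩ := mpfold_spec pattern.toList pattern.toList.length 0
    (List.replicate (pattern.toList.length + 1) 0) (by omega) (by simp)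
  rw [show cmF pattern.toList 0 = (0 : Int) from rfl] at c1 c2 c3 c4
  simp only [matched_prefix_array]
  rw [zv_eq]
  apply List.ext_getElem
  · simp only [List.length_set, c3]
    simp
  · intro i h1' h2'
    have hn : i < pattern.toList.length + 1 := by
      simp only [List.length_set, c3, List.length_replicate] at h1'
      exact h1'
    rw [← List.getD_eq_getElem _ 0 h1', ← List.getD_eq_getElem _ 0 h2', getD_set]
    by_cases hi0 : i = 0
    · subst hi0
      rw [if_pos ⟨rfl, by rw [c3]; simp⟩]
      simp
    · rw [if_neg (by simp [hi0]), c4 i, if_pos (by omega)]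
      cases i with
      | zero => omega
      | succ m =>
        rw [List.getD_cons_succ]
        rw [getD_reverse _ _ (by simp only [List.length_map, List.length_range']; omega)]
        simp only [List.length_map, List.length_range']
        rw [getD_map_range' _ _ _ (by omega)]
        congr 1
        omega

theorem b_closed (pattern : String) :
    matched_prefix_array_alt pattern =
      ((pattern.toList.length : Int)) ::
        ((List.range' 0 pattern.toList.length).map (fun a => cmF pattern.toList (a + 1))).reverse := by
  have hfold := bfold_spec pattern.toList pattern.toList.length 0 [] (by omega)
  rw [show (cmF pattern.toList 0) = (0 : Int) from rfl] at hfold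
  simp only [matched_prefix_array_alt]
  rw [List.range_eq_range', hfold]
  simp

-- ===== VERDICT (by name: the statement is the Claim_ definition above) =====
theorem matched_prefix_array_spec : Claim_equal_matched_prefix_array := by
  intro pattern _
  unfold Spec_matched_prefix_array
  rw [a_closed, b_closed]
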